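-- pv_equiv track=rewrite | github.com/harryrz/Gomoku | gomoku.py | detect_row
-- ===== SOURCE A (Python) =====
-- def is_sq_in_board(board, y, x):
--     #since board is a square, len of row and col is the same
--     col_row_length = len(board)
--     if (x >= 0 and x+1 <= col_row_length) and (y >= 0 and y+1 <= col_row_length):
--         return True
--     return False
--
-- def is_bounded(board, y_end, x_end, length, d_y, d_x):
--     num_close = 0
--
--     #check the location after the end one, valid? closed?
--     y_after = y_end + d_y
--     x_after = x_end + d_x
--     #if valid location, check if blocked
--     if is_sq_in_board(board, y_after, x_after):
--         if not board[y_after][x_after] == " ":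
--             num_close += 1
--     #if out of bound
--     else:
--         num_close += 1
--
--     #check the location before the start one, valid?
--     y_before = y_end - length * d_y
--     x_before = x_end - length * d_x
--     if is_sq_in_board(board, y_before, x_before):
--         if not board[y_before][x_before] == " ":
--             num_close += 1
--     else:
--         num_close += 1
--
--     if num_close == 2:
--         return "CLOSED"
--     elif num_close == 1:
--         return "SEMIOPEN"
--     else:
--         return "OPEN"
--
-- def is_sequence_complete(board, col, y_start, x_start, length, d_y, d_x):
--     #first check if sequence exists
--     y = y_start
--     x = x_start
--
--     for i in range(length):
--         #if cur checking square is not the color we want or it's out of bound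
--         if  (not is_sq_in_board(board, y, x)) or board[y][x] != col:
--             return False
--         y += d_y
--         x += d_x
--
--     #if sequence exist, check boundary cases before and after
--     before_y = y_start - d_y
--     before_x = x_start - d_x
--
--     #if before square is valid square
--     if is_sq_in_board(board, before_y, before_x):
--         if board[before_y][before_x] == col:
--             return False
--
--     #if after square is valid square
--     if is_sq_in_board(board, y, x):
--         if board[y][x] == col:
--             return False
--
--     return True
--
-- def detect_row(board, col, y_start, x_start, length, d_y, d_x):
--     open_seq_count = 0
--     semi_open_seq_count = 0
--
--     cur_y = y_start
--     cur_x = x_start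
--
--     #keep checking rows/columns/diagonals when cur_y/x is in bound of board
--     while is_sq_in_board(board, cur_y, cur_x):
--         #using another method, if cur location contain a complete sequence match length and direction
--         if is_sequence_complete(board, col, cur_y, cur_x, length, d_y, d_x):
--             #check bounded condition, note the cur x and y send into the fcn is actually the end point
--             condition = is_bounded(board, cur_y + (length-1) * d_y, cur_x + (length-1) * d_x, length, d_y, d_x)
--             if condition == "OPEN":
--                 open_seq_count += 1
--             elif condition == "SEMIOPEN":
--                 semi_open_seq_count += 1
--
--         #go to next location in a row
--         cur_y += d_y
--         cur_x += d_x
--     return open_seq_count, semi_open_seq_count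
-- ===== SOURCE B (Python) =====
-- def detect_row(board, col, y_start, x_start, length, d_y, d_x):
--     # One pass: walk the ray once, collecting the cell before the start, the
--     # traversed cells and an out-of-board sentinel (None); then scan that line
--     # once, counting maximal runs of col of exact `length` and classifying each
--     # by its two neighbouring elements (None/non-blank = closed end).
--     n = len(board)
--     y, x = y_start, x_start
--     if not (0 <= y < n and 0 <= x < n):
--         return 0, 0
--     by, bx = y_start - d_y, x_start - d_x
--     line = [board[by][bx] if 0 <= by < n and 0 <= bx < n else None]
--     while 0 <= y < n and 0 <= x < n:
--         line.append(board[y][x])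
--         y += d_y
--         x += d_x
--     line.append(None)
--     open_count = 0
--     semi_count = 0
--     run = 0
--     before = line[0]
--     for c in line[1:]:
--         if c == col:
--             run += 1
--         else:
--             if run == length and before != col:
--                 closed = (1 if (before is None or before != " ") else 0) + (1 if (c is None or c != " ") else 0)
--                 if closed == 0:
--                     open_count += 1
--                 elif closed == 1:
--                     semi_count += 1
--             run = 0
--             before = c
--     return open_count, semi_count
-- ===== Notes on version B (the rewrite author's own statement) =====
-- stated objective: alternative
-- what changed: A re-scans up to `length` cells ahead (plus boundary squares) at every position of the ray; B walks the ray once, building the line of cells with its two boundary sentinels, and counts maximal runs of col of exact length in a single run-length scan, classifying each run by its two neighbouring elements.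
-- outside the precondition, e.g. on detect_row([[], ['x']], 'b', 1, 0, 1, 1, 0): A returns (0, 0), B raises IndexError; on detect_row([[' ']], 'b', 0, 0, 0, 0, 1): A returns (0, 1), B returns (0, 2)
import Mathlib
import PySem

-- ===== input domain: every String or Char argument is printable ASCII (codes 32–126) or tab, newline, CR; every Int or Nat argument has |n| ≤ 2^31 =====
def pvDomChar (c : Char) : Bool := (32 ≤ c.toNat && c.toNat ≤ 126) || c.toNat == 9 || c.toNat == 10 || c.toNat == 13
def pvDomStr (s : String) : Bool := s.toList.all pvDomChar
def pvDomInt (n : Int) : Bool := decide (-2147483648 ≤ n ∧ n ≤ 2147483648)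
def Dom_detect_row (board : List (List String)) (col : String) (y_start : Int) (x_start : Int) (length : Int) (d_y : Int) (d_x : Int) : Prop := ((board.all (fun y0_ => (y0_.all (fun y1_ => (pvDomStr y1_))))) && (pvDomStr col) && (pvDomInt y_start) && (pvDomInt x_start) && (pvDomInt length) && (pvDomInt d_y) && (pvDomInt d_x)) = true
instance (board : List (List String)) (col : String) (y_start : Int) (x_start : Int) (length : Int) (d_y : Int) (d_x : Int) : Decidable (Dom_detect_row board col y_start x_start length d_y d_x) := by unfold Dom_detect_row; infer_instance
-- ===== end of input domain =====

-- B replaces A's per-position length-long lookahead by a single pass over the ray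
-- that scans maximal runs of `col`; equivalence of the return values is proved on
-- Pre_ (rows at least len(board) long, length ≥ 1, and a terminating direction).

-- ===== PORT A =====
-- board[y][x] for guarded coordinates; the "" default is taken only on ragged
-- boards (a row shorter than len(board)), which Pre_ excludes (Python raises there).
def pvCell (board : List (List String)) (y x : Int) : String :=
  ((PySem.List.pyGet? board y).bind (fun row => PySem.List.pyGet? row x)).getD ""

def is_sq_in_board (board : List (List String)) (y x : Int) : Bool :=
  decide ((x ≥ 0 ∧ x + 1 ≤ (board.length : Int)) ∧ (y ≥ 0 ∧ y + 1 ≤ (board.length : Int)))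

def is_bounded (board : List (List String)) (y_end x_end length d_y d_x : Int) : String :=
  let num_close : Int := 0
  let y_after := y_end + d_y
  let x_after := x_end + d_x
  let num_close : Int :=
    if is_sq_in_board board y_after x_after then
      (if !(pvCell board y_after x_after == " ") then num_close + 1 else num_close)
    else num_close + 1
  let y_before := y_end - length * d_y
  let x_before := x_end - length * d_x
  let num_close : Int :=
    if is_sq_in_board board y_before x_before then
      (if !(pvCell board y_before x_before == " ") then num_close + 1 else num_close)
    else num_close + 1
  if num_close = 2 then "CLOSED" else if num_close = 1 then "SEMIOPEN" else "OPEN"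

-- the `for i in range(length)` loop of is_sequence_complete: early `return False`
-- is `none`, otherwise the final (y, x) is returned
def pvSeqLoop (board : List (List String)) (col : String) (d_y d_x : Int) : Nat → Int → Int → Option (Int × Int)
  | 0, y, x => some (y, x)
  | n + 1, y, x =>
    if !(is_sq_in_board board y x) || !(pvCell board y x == col) then none
    else pvSeqLoop board col d_y d_x n (y + d_y) (x + d_x)

def is_sequence_complete (board : List (List String)) (col : String) (y_start x_start length d_y d_x : Int) : Bool :=
  match pvSeqLoop board col d_y d_x length.toNat y_start x_start with
  | none => false
  | some (y, x) =>
    let before_y := y_start - d_y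
    let before_x := x_start - d_x
    if is_sq_in_board board before_y before_x && (pvCell board before_y before_x == col) then false
    else if is_sq_in_board board y x && (pvCell board y x == col) then false
    else true

-- the while loop of detect_row; fuel board.length+1 suffices whenever the Python
-- loop terminates (Pre_), each iteration moves one step along the ray
def pvRowLoop (board : List (List String)) (col : String) (length d_y d_x : Int) :
    Nat → Int → Int → Int → Int → Int × Int
  | 0, _, _, oc, sc => (oc, sc)
  | f + 1, y, x, oc, sc =>
    if is_sq_in_board board y x then
      if is_sequence_complete board col y x length d_y d_x then
        let cond := is_bounded board (y + (length - 1) * d_y) (x + (length - 1) * d_x) length d_y d_x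
        if cond == "OPEN" then pvRowLoop board col length d_y d_x f (y + d_y) (x + d_x) (oc + 1) sc
        else if cond == "SEMIOPEN" then pvRowLoop board col length d_y d_x f (y + d_y) (x + d_x) oc (sc + 1)
        else pvRowLoop board col length d_y d_x f (y + d_y) (x + d_x) oc sc
      else pvRowLoop board col length d_y d_x f (y + d_y) (x + d_x) oc sc
    else (oc, sc)

def detect_row (board : List (List String)) (col : String) (y_start : Int) (x_start : Int) (length : Int) (d_y : Int) (d_x : Int) : Int × Int :=
  pvRowLoop board col length d_y d_x (board.length + 1) y_start x_start 0 0

-- ===== PORT B =====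
-- B's inline bound check `0 <= y < n and 0 <= x < n`
def pvInB (board : List (List String)) (y x : Int) : Bool :=
  decide (0 ≤ y ∧ y < (board.length : Int) ∧ 0 ≤ x ∧ x < (board.length : Int))

-- B's while loop collecting the traversed cells (same fuel bound as A's loop)
def pvCollect (board : List (List String)) (d_y d_x : Int) : Nat → Int → Int → List String
  | 0, _, _ => []
  | f + 1, y, x =>
    if pvInB board y x then pvCell board y x :: pvCollect board d_y d_x f (y + d_y) (x + d_x)
    else []

-- B's single scan over line[1:], state (before, run, open_count, semi_count)
def pvScan (col : String) (length : Int) :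
    List (Option String) → Option String → Int → Int → Int → Int × Int
  | [], _, _, oc, sc => (oc, sc)
  | c :: rest, before, run, oc, sc =>
    if c == some col then pvScan col length rest before (run + 1) oc sc
    else
      if run == length && !(before == some col) then
        let closed : Int :=
          (if (match before with | none => true | some s => !(s == " ")) then 1 else 0) +
          (if (match c with | none => true | some s => !(s == " ")) then 1 else 0)
        if closed = 0 then pvScan col length rest c 0 (oc + 1) sc
        else if closed = 1 then pvScan col length rest c 0 oc (sc + 1)
        else pvScan col length rest c 0 oc sc
      else pvScan col length rest c 0 oc sc

def detect_row_alt (board : List (List String)) (col : String) (y_start : Int) (x_start : Int) (length : Int) (d_y : Int) (d_x : Int) : Int × Int :=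
  if !(pvInB board y_start x_start) then (0, 0)
  else
    let first : Option String :=
      if pvInB board (y_start - d_y) (x_start - d_x) then some (pvCell board (y_start - d_y) (x_start - d_x)) else none
    let cells := pvCollect board d_y d_x (board.length + 1) y_start x_start
    pvScan col length (cells.map some ++ [none]) first 0 0 0

-- ===== PRECONDITION & SPEC =====
-- the row under a ray cell is long enough for A's square-board indexing
def pvRowOk (board : List (List String)) (y x : Int) : Prop :=
  pvInB board y x = true → x < (((PySem.List.pyGet? board y).getD []).length : Int)

-- Pre_ excludes (i) boards whose rows are too short at some square-in-board cell
-- of the ray (start-1 … start+len(board) steps) when the start is on the board —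
-- A indexes rows square-wise there and raises IndexError on the short rows it
-- reaches (a few such boards whose short cells A happens never to read are also
-- excluded by this geometric over-approximation); (ii) length ≤ 0, outside the
-- natural domain of a run length (A returns accidental values for empty
-- sequences there); and (iii) d_y = d_x = 0 with an in-board start, where A's
-- while loop never terminates.
def Pre_detect_row (board : List (List String)) (col : String) (y_start : Int) (x_start : Int) (length : Int) (d_y : Int) (d_x : Int) : Prop :=
  (pvInB board y_start x_start = true →
    ∀ k ∈ List.range (board.length + 2),
      pvRowOk board (y_start + ((k : Int) - 1) * d_y) (x_start + ((k : Int) - 1) * d_x)) ∧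
  1 ≤ length ∧
  (¬(d_y = 0 ∧ d_x = 0) ∨ pvInB board y_start x_start = false)

instance (board : List (List String)) (col : String) (y_start : Int) (x_start : Int) (length : Int) (d_y : Int) (d_x : Int) : Decidable (Pre_detect_row board col y_start x_start length d_y d_x) := by
  unfold Pre_detect_row pvRowOk; infer_instance

def pvWitness_detect_row : List (List String) × String × Int × Int × Int × Int × Int :=
  ([[" ", "b"], ["b", " "]], "b", 0, 0, 1, 0, 1)

def Spec_detect_row (board : List (List String)) (col : String) (y_start : Int) (x_start : Int) (length : Int) (d_y : Int) (d_x : Int) (out : Int × Int) : Prop := out = detect_row_alt board col y_start x_start length d_y d_x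
instance (board : List (List String)) (col : String) (y_start : Int) (x_start : Int) (length : Int) (d_y : Int) (d_x : Int) (out : Int × Int) : Decidable (Spec_detect_row board col y_start x_start length d_y d_x out) := by unfold Spec_detect_row; infer_instance

-- ===== CLAIM (what is proved, stated in full; the proofs are below) =====
def Claim_equal_detect_row : Prop := ∀ (board : List (List String)) (col : String) (y_start : Int) (x_start : Int) (length : Int) (d_y : Int) (d_x : Int), Dom_detect_row board col y_start x_start length d_y d_x → Pre_detect_row board col y_start x_start length d_y d_x → Spec_detect_row board col y_start x_start length d_y d_x (detect_row board col y_start x_start length d_y d_x)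

-- ===== LEMMAS AND PROOFS =====

-- proof-side helpers --------------------------------------------------------

-- the cell at (y,x) as B's scan sees it: none = out of board
def pvPosOpt (board : List (List String)) (y x : Int) : Option String :=
  if pvInB board y x then some (pvCell board y x) else none

def pvAddP (a b : Int × Int) : Int × Int := (a.1 + b.1, a.2 + b.2)

-- closedness count of one neighbouring element
def pvCl (o : Option String) : Int :=
  match o with
  | none => 1
  | some s => if s = " " then 0 else 1

-- boundedness contribution of a counted run with neighbours b (before) and e (after)
def pvBnd (b e : Option String) : Int × Int :=
  if pvCl e + pvCl b = 2 then (0, 0) else if pvCl e + pvCl b = 1 then (0, 1) else (1, 0)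

-- length of the leading run of col
def pvLead (col : String) : List String → Nat
  | [] => 0
  | c :: t => if c = col then pvLead col t + 1 else 0

-- the run-in-progress credit: what B's scan will still count for the run whose
-- first r cells lie before the current position, while A counted it at its start
def pvC (board : List (List String)) (col : String) (length d_y d_x : Int)
    (f : Nat) (y x : Int) (b : Option String) (r : Int) : Int × Int :=
  if 1 ≤ r ∧ b ≠ some col ∧ r + (pvLead col (pvCollect board d_y d_x f y x) : Int) = length then
    pvBnd b (pvPosOpt board (y + (pvLead col (pvCollect board d_y d_x f y x) : Int) * d_y)
                           (x + (pvLead col (pvCollect board d_y d_x f y x) : Int) * d_x))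
  else (0, 0)

-- the traversal leaves the board within f steps
def pvExits (board : List (List String)) (d_y d_x : Int) : Nat → Int → Int → Bool
  | 0, y, x => !pvInB board y x
  | f + 1, y, x => !pvInB board y x || pvExits board d_y d_x f (y + d_y) (x + d_x)

lemma inb_eq (board : List (List String)) (y x : Int) :
    is_sq_in_board board y x = pvInB board y x := by
  unfold is_sq_in_board pvInB
  rw [decide_eq_decide]
  omega

lemma exits_suff (board : List (List String)) (d_y d_x : Int) :
    ∀ (k : Nat) (y x : Int),
      ((1 ≤ d_y ∧ (board.length : Int) ≤ y + k) ∨ (d_y ≤ -1 ∧ y < k) ∨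
       (1 ≤ d_x ∧ (board.length : Int) ≤ x + k) ∨ (d_x ≤ -1 ∧ x < k)) →
      pvExits board d_y d_x k y x = true := by
  intro k
  induction k with
  | zero =>
    intro y x h
    have : pvInB board y x = false := by
      unfold pvInB; rw [decide_eq_false_iff_not]; push_cast at h ⊢; omega
    simp [pvExits, this]
  | succ k ih =>
    intro y x h
    by_cases hin : pvInB board y x = true
    · have : pvExits board d_y d_x k (y + d_y) (x + d_x) = true := by
        apply ih; push_cast at h ⊢; omega
      simp [pvExits, this]
    · simp [pvExits, Bool.not_eq_true] at hin ⊢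
      left; exact hin

lemma rowLoop_acc (board : List (List String)) (col : String) (length d_y d_x : Int) :
    ∀ (f : Nat) (y x oc sc : Int),
      pvRowLoop board col length d_y d_x f y x oc sc =
        pvAddP (oc, sc) (pvRowLoop board col length d_y d_x f y x 0 0) := by
  intro f
  induction f with
  | zero => intro y x oc sc; simp [pvRowLoop, pvAddP]
  | succ f ih =>
    intro y x oc sc
    by_cases hin : is_sq_in_board board y x = true
    · by_cases hc : is_sequence_complete board col y x length d_y d_x = true
      · simp only [pvRowLoop, hin, hc, if_true]
        split
        · rw [ih _ _ (oc+1) sc, ih _ _ (0+1) 0]; simp [pvAddP]; try omega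
        · split
          · rw [ih _ _ oc (sc+1), ih _ _ 0 (0+1)]; simp [pvAddP]; try omega
          · rw [ih _ _ oc sc]
      · simp only [pvRowLoop, hin, if_true, Bool.not_eq_true] at *
        rw [hc]; simp only [Bool.false_eq_true, if_false]
        rw [ih _ _ oc sc]
    · simp only [Bool.not_eq_true] at hin
      simp [pvRowLoop, hin, pvAddP]

lemma scan_acc (col : String) (length : Int) :
    ∀ (l : List (Option String)) (b : Option String) (r oc sc : Int),
      pvScan col length l b r oc sc = pvAddP (oc, sc) (pvScan col length l b r 0 0) := by
  intro l
  induction l with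
  | nil => intro b r oc sc; simp [pvScan, pvAddP]
  | cons c rest ih =>
    intro b r oc sc
    by_cases hc : (c == some col) = true
    · simp only [pvScan, hc, if_true]
      rw [ih b (r+1) oc sc]
    · simp only [Bool.not_eq_true] at hc
      simp only [pvScan, hc, Bool.false_eq_true, if_false]
      split_ifs <;>
        first
          | rw [ih c 0 oc sc]
          | (rw [ih c 0 (oc+1) sc, ih c 0 (0+1) 0]; simp [pvAddP]; try omega)
          | (rw [ih c 0 oc (sc+1), ih c 0 0 (0+1)]; simp [pvAddP]; try omega)

lemma seqLoop_eq (board : List (List String)) (col : String) (d_y d_x : Int) :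
    ∀ (k f : Nat) (y x : Int), pvExits board d_y d_x f y x = true →
      pvSeqLoop board col d_y d_x k y x =
        (if k ≤ pvLead col (pvCollect board d_y d_x f y x) then some (y + k * d_y, x + k * d_x) else none) := by
  intro k
  induction k with
  | zero => intro f y x _; simp [pvSeqLoop]
  | succ k ih =>
    intro f y x hex
    by_cases hin : pvInB board y x = true
    · cases f with
      | zero => simp [pvExits, hin] at hex
      | succ f =>
        have hex' : pvExits board d_y d_x f (y + d_y) (x + d_x) = true := by
          simpa [pvExits, hin] using hex
        by_cases hcol : pvCell board y x = col
        · have hstep : pvSeqLoop board col d_y d_x (k+1) y x = pvSeqLoop board col d_y d_x k (y + d_y) (x + d_x) := by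
            simp [pvSeqLoop, inb_eq, hin, hcol]
          rw [hstep, ih f (y + d_y) (x + d_x) hex']
          simp only [pvCollect, hin, if_true, pvLead, hcol, if_true]
          have h1 : y + d_y + (k : Int) * d_y = y + ((k : Nat) + 1 : Nat) * d_y := by push_cast; ring
          have h2 : x + d_x + (k : Int) * d_x = x + ((k : Nat) + 1 : Nat) * d_x := by push_cast; ring
          rw [h1, h2]
          by_cases hk : k ≤ pvLead col (pvCollect board d_y d_x f (y + d_y) (x + d_x))
          · rw [if_pos hk, if_pos (by omega)]
          · rw [if_neg hk, if_neg (by omega)]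
        · have hlead : pvLead col (pvCollect board d_y d_x (f+1) y x) = 0 := by
            simp [pvCollect, hin, pvLead, hcol]
          rw [hlead]
          simp [pvSeqLoop, inb_eq, hin, hcol]
    · simp only [Bool.not_eq_true] at hin
      have hnil : pvCollect board d_y d_x f y x = [] := by
        cases f <;> simp [pvCollect, hin]
      rw [hnil]
      simp [pvSeqLoop, inb_eq, hin, pvLead]

-- the cell just past the leading run is not an in-board col cell
lemma lead_after (board : List (List String)) (col : String) (d_y d_x : Int) :
    ∀ (f : Nat) (y x : Int), pvExits board d_y d_x f y x = true →
      ¬(pvPosOpt board (y + (pvLead col (pvCollect board d_y d_x f y x) : Int) * d_y)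
                        (x + (pvLead col (pvCollect board d_y d_x f y x) : Int) * d_x) = some col) := by
  intro f
  induction f with
  | zero =>
    intro y x hex
    have hin : pvInB board y x = false := by simpa [pvExits] using hex
    simp [pvCollect, pvLead, pvPosOpt, hin]
  | succ f ih =>
    intro y x hex
    by_cases hin : pvInB board y x = true
    · have hex' : pvExits board d_y d_x f (y + d_y) (x + d_x) = true := by
        simpa [pvExits, hin] using hex
      by_cases hcol : pvCell board y x = col
      · simp only [pvCollect, hin, if_true, pvLead, hcol, if_true]
        have h1 : y + ((pvLead col (pvCollect board d_y d_x f (y+d_y) (x+d_x)) + 1 : Nat) : Int) * d_y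
            = (y + d_y) + (pvLead col (pvCollect board d_y d_x f (y+d_y) (x+d_x)) : Int) * d_y := by
          push_cast; ring
        have h2 : x + ((pvLead col (pvCollect board d_y d_x f (y+d_y) (x+d_x)) + 1 : Nat) : Int) * d_x
            = (x + d_x) + (pvLead col (pvCollect board d_y d_x f (y+d_y) (x+d_x)) : Int) * d_x := by
          push_cast; ring
        rw [h1, h2]
        exact ih (y + d_y) (x + d_x) hex'
      · simp only [pvCollect, hin, if_true, pvLead, hcol, if_false]
        simp [pvPosOpt, hin, hcol]
    · simp only [Bool.not_eq_true] at hin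
      simp [pvCollect, pvLead, pvPosOpt, hin]

-- cells inside the leading run are in-board col cells
lemma lead_inside (board : List (List String)) (col : String) (d_y d_x : Int) :
    ∀ (f j : Nat) (y x : Int), pvExits board d_y d_x f y x = true →
      j < pvLead col (pvCollect board d_y d_x f y x) →
      pvPosOpt board (y + (j : Int) * d_y) (x + (j : Int) * d_x) = some col := by
  intro f
  induction f with
  | zero => intro j y x _ hj; simp [pvCollect, pvLead] at hj
  | succ f ih =>
    intro j y x hex hj
    by_cases hin : pvInB board y x = true
    · have hex' : pvExits board d_y d_x f (y + d_y) (x + d_x) = true := by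
        simpa [pvExits, hin] using hex
      by_cases hcol : pvCell board y x = col
      · cases j with
        | zero => simp [pvPosOpt, hin, hcol]
        | succ j =>
          have hj' : j < pvLead col (pvCollect board d_y d_x f (y+d_y) (x+d_x)) := by
            simp only [pvCollect, hin, if_true, pvLead, hcol, if_true] at hj
            omega
          have h1 : y + ((j + 1 : Nat) : Int) * d_y = (y + d_y) + (j : Int) * d_y := by push_cast; ring
          have h2 : x + ((j + 1 : Nat) : Int) * d_x = (x + d_x) + (j : Int) * d_x := by push_cast; ring
          rw [h1, h2]
          exact ih j (y + d_y) (x + d_x) hex' hj'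
      · simp [pvCollect, hin, pvLead, hcol] at hj
    · simp only [Bool.not_eq_true] at hin
      have hnil : pvCollect board d_y d_x (f+1) y x = [] := by simp [pvCollect, hin]
      rw [hnil] at hj; simp [pvLead] at hj

lemma complete_char (board : List (List String)) (col : String) (d_y d_x length : Int)
    (hL : 1 ≤ length) (f : Nat) (y x : Int)
    (hex : pvExits board d_y d_x f y x = true) :
    is_sequence_complete board col y x length d_y d_x =
      (decide ((pvLead col (pvCollect board d_y d_x f y x) : Int) = length) &&
       !(pvPosOpt board (y - d_y) (x - d_x) == some col)) := by
  have hbefore : (is_sq_in_board board (y - d_y) (x - d_x) && (pvCell board (y - d_y) (x - d_x) == col))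
      = (pvPosOpt board (y - d_y) (x - d_x) == some col) := by
    unfold pvPosOpt
    rw [inb_eq]
    by_cases h : pvInB board (y - d_y) (x - d_x) = true <;> simp [h]
  have hL0 : ((length.toNat : Nat) : Int) = length := Int.toNat_of_nonneg (by omega)
  by_cases hk : length.toNat ≤ pvLead col (pvCollect board d_y d_x f y x)
  · rcases Nat.lt_or_ge length.toNat (pvLead col (pvCollect board d_y d_x f y x)) with hlt | hge
    · -- strictly inside the run: the cell after the candidate sequence is still col
      have hafter := lead_inside board col d_y d_x f length.toNat y x hex hlt
      rw [hL0] at hafter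
      have hmne : ¬((pvLead col (pvCollect board d_y d_x f y x) : Int) = length) := by omega
      unfold is_sequence_complete
      rw [seqLoop_eq board col d_y d_x length.toNat f y x hex, if_pos hk]
      have haftb : (is_sq_in_board board (y + length.toNat * d_y) (x + length.toNat * d_x)
          && (pvCell board (y + length.toNat * d_y) (x + length.toNat * d_x) == col)) = true := by
        rw [inb_eq]
        unfold pvPosOpt at hafter
        rw [hL0]
        by_cases h : pvInB board (y + length * d_y) (x + length * d_x) = true
        · simp [h] at hafter ⊢; exact hafter
        · simp [h] at hafter
      simp only [haftb]
      simp [hmne]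
    · -- exact length: the run ends right after the candidate sequence
      have hm : (pvLead col (pvCollect board d_y d_x f y x) : Int) = length := by omega
      have hafter := lead_after board col d_y d_x f y x hex
      unfold is_sequence_complete
      rw [seqLoop_eq board col d_y d_x length.toNat f y x hex, if_pos hk]
      have haftb : (is_sq_in_board board (y + length.toNat * d_y) (x + length.toNat * d_x)
          && (pvCell board (y + length.toNat * d_y) (x + length.toNat * d_x) == col)) = false := by
        rw [inb_eq]
        unfold pvPosOpt at hafter
        rw [hL0, ← hm] at *
        by_cases h : pvInB board (y + (pvLead col (pvCollect board d_y d_x f y x) : Int) * d_y)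
            (x + (pvLead col (pvCollect board d_y d_x f y x) : Int) * d_x) = true
        · simp [h] at hafter ⊢; exact hafter
        · simp [h]
      simp only [hbefore, haftb]
      by_cases hbq : (pvPosOpt board (y - d_y) (x - d_x) == some col) = true <;> simp [hbq, hm]
  · have hmne : ¬((pvLead col (pvCollect board d_y d_x f y x) : Int) = length) := by omega
    unfold is_sequence_complete
    rw [seqLoop_eq board col d_y d_x length.toNat f y x hex, if_neg hk]
    simp [hmne]

lemma complete_false_head (board : List (List String)) (col : String) (d_y d_x length : Int)
    (hL : 1 ≤ length) (y x : Int) (hc : ¬(pvCell board y x = col)) :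
    is_sequence_complete board col y x length d_y d_x = false := by
  have h1 : length.toNat = (length.toNat - 1) + 1 := by omega
  unfold is_sequence_complete
  rw [h1]
  simp [pvSeqLoop, hc]

lemma complete_false_prev (board : List (List String)) (col : String) (d_y d_x length : Int)
    (y x : Int) (hin : pvInB board (y - d_y) (x - d_x) = true)
    (hc : pvCell board (y - d_y) (x - d_x) = col) :
    is_sequence_complete board col y x length d_y d_x = false := by
  unfold is_sequence_complete
  cases hseq : pvSeqLoop board col d_y d_x length.toNat y x with
  | none => simp
  | some p =>
    rcases p with ⟨a, b⟩
    simp [inb_eq, hin, hc]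

lemma bounded_char (board : List (List String)) (length d_y d_x : Int) (y x : Int) :
    is_bounded board (y + (length - 1) * d_y) (x + (length - 1) * d_x) length d_y d_x =
      (if pvCl (pvPosOpt board (y + length * d_y) (x + length * d_x)) + pvCl (pvPosOpt board (y - d_y) (x - d_x)) = 2 then "CLOSED"
       else if pvCl (pvPosOpt board (y + length * d_y) (x + length * d_x)) + pvCl (pvPosOpt board (y - d_y) (x - d_x)) = 1 then "SEMIOPEN"
       else "OPEN") := by
  have h1 : y + (length - 1) * d_y + d_y = y + length * d_y := by ring
  have h2 : x + (length - 1) * d_x + d_x = x + length * d_x := by ring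
  have h3 : y + (length - 1) * d_y - length * d_y = y - d_y := by ring
  have h4 : x + (length - 1) * d_x - length * d_x = x - d_x := by ring
  unfold is_bounded
  simp only [inb_eq, h1, h2, h3, h4]
  by_cases ha : pvInB board (y + length * d_y) (x + length * d_x) = true
  · by_cases hb : pvInB board (y - d_y) (x - d_x) = true
    · simp only [ha, hb, if_true, pvPosOpt, pvCl]
      by_cases hs1 : pvCell board (y + length * d_y) (x + length * d_x) = " " <;>
        by_cases hs2 : pvCell board (y - d_y) (x - d_x) = " " <;>
          simp [hs1, hs2]
    · have hb' : pvInB board (y - d_y) (x - d_x) = false := by simpa using hb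
      simp only [ha, hb', if_true, Bool.false_eq_true, if_false, pvPosOpt, pvCl]
      by_cases hs1 : pvCell board (y + length * d_y) (x + length * d_x) = " " <;> simp [hs1]
  · have ha' : pvInB board (y + length * d_y) (x + length * d_x) = false := by simpa using ha
    by_cases hb : pvInB board (y - d_y) (x - d_x) = true
    · simp only [ha', hb, if_true, Bool.false_eq_true, if_false, pvPosOpt, pvCl]
      by_cases hs2 : pvCell board (y - d_y) (x - d_x) = " " <;> simp [hs2]
    · have hb' : pvInB board (y - d_y) (x - d_x) = false := by simpa using hb
      simp only [ha', hb', Bool.false_eq_true, if_false, pvPosOpt, pvCl]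
      simp

lemma pvCl_cases (o : Option String) : pvCl o = 0 ∨ pvCl o = 1 := by
  rcases o with _ | s
  · right; rfl
  · by_cases h : s = " "
    · left; simp [pvCl, h]
    · right; simp [pvCl, h]

lemma closedO_eq (o : Option String) :
    (if (match o with | none => true | some s => !(s == " ")) = true then (1 : Int) else 0) = pvCl o := by
  unfold pvCl
  rcases o with _ | s
  · simp
  · by_cases h : s = " " <;> simp [h]

-- one non-col step of B's scan, with the accumulators factored out
lemma scan_step_noncol (col : String) (length : Int) (rest : List (Option String))
    (c b : Option String) (r : Int) (hc : (c == some col) = false) :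
    pvScan col length (c :: rest) b r 0 0 =
      pvAddP (if r = length ∧ ¬ b = some col then pvBnd b c else (0, 0))
             (pvScan col length rest c 0 0 0) := by
  simp only [pvScan, hc, Bool.false_eq_true, if_false]
  by_cases hcnd : r = length ∧ ¬ b = some col
  · have hbeq : (r == length && !(b == some col)) = true := by
      simp [hcnd.1, hcnd.2]
    rw [hbeq, if_pos hcnd]
    simp only [if_true, closedO_eq]
    unfold pvBnd
    rcases pvCl_cases b with hb1 | hb1 <;> rcases pvCl_cases c with hc1 | hc1 <;>
      rw [hb1, hc1] <;> norm_num <;>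
        rw [scan_acc col length rest c 0] <;> simp [pvAddP] <;> try omega
  · have hbeq : (r == length && !(b == some col)) = false := by
      rcases not_and_or.mp hcnd with h | h
      · simp [h]
      · simp only [not_not] at h; simp [h]
    rw [hbeq, if_neg hcnd]
    simp only [Bool.false_eq_true, if_false]
    rw [scan_acc col length rest c 0]
    simp [pvAddP]

lemma rowLoop_step (board : List (List String)) (col : String) (length d_y d_x : Int)
    (f : Nat) (y x : Int) (hin : pvInB board y x = true) :
    pvRowLoop board col length d_y d_x (f + 1) y x 0 0 =
      pvAddP (if is_sequence_complete board col y x length d_y d_x then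
                pvBnd (pvPosOpt board (y - d_y) (x - d_x)) (pvPosOpt board (y + length * d_y) (x + length * d_x))
              else (0, 0))
             (pvRowLoop board col length d_y d_x f (y + d_y) (x + d_x) 0 0) := by
  have hsq : is_sq_in_board board y x = true := by rw [inb_eq]; exact hin
  by_cases hc : is_sequence_complete board col y x length d_y d_x = true
  · simp only [pvRowLoop, hsq, hc, if_true]
    rw [bounded_char]
    unfold pvBnd
    rcases pvCl_cases (pvPosOpt board (y + length * d_y) (x + length * d_x)) with he | he <;>
      rcases pvCl_cases (pvPosOpt board (y - d_y) (x - d_x)) with hb | hb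
    · rw [he, hb]; norm_num
      rw [rowLoop_acc board col length d_y d_x f (y + d_y) (x + d_x) 1 0]; try simp [pvAddP]
    · rw [he, hb]; norm_num
      rw [rowLoop_acc board col length d_y d_x f (y + d_y) (x + d_x) 0 1]; try simp [pvAddP]
    · rw [he, hb]; norm_num
      rw [rowLoop_acc board col length d_y d_x f (y + d_y) (x + d_x) 0 1]; try simp [pvAddP]
    · rw [he, hb]; norm_num
      simp [pvAddP]
  · simp only [Bool.not_eq_true] at hc
    simp only [pvRowLoop, hsq, hc, if_true, Bool.false_eq_true, if_false]
    simp [pvAddP]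

lemma collect_out (board : List (List String)) (d_y d_x : Int) (y x : Int)
    (hin : pvInB board y x = false) (f : Nat) : pvCollect board d_y d_x f y x = [] := by
  cases f <;> simp [pvCollect, hin]

lemma rowLoop_out (board : List (List String)) (col : String) (length d_y d_x : Int)
    (y x : Int) (hin : pvInB board y x = false) (f : Nat) (oc sc : Int) :
    pvRowLoop board col length d_y d_x f y x oc sc = (oc, sc) := by
  have hsq : is_sq_in_board board y x = false := by rw [inb_eq]; exact hin
  cases f
  · rfl
  · simp [pvRowLoop, hsq]

-- off the board: nothing left on either side but the run credit
lemma scan_eq_edge (board : List (List String)) (col : String) (length d_y d_x : Int)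
    (hL : 1 ≤ length) (f : Nat) (y x : Int) (b : Option String) (r : Int)
    (hin : pvInB board y x = false) :
    pvScan col length ((pvCollect board d_y d_x f y x).map some ++ [none]) b r 0 0 =
      pvAddP (pvRowLoop board col length d_y d_x f y x 0 0)
             (pvC board col length d_y d_x f y x b r) := by
  rw [collect_out board d_y d_x y x hin f]
  simp only [List.map_nil, List.nil_append]
  rw [scan_step_noncol col length [] none b r rfl]
  rw [rowLoop_out board col length d_y d_x y x hin f 0 0]
  unfold pvC
  rw [collect_out board d_y d_x y x hin f]
  have he : pvPosOpt board (y + ((pvLead col ([] : List String) : Nat) : Int) * d_y)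
      (x + ((pvLead col ([] : List String) : Nat) : Int) * d_x) = none := by
    simp [pvLead, pvPosOpt, hin]
  rw [he]
  by_cases hcnd : r = length ∧ ¬ b = some col
  · rw [if_pos hcnd, if_pos ⟨by omega, hcnd.2, by simp [pvLead]; omega⟩]
    simp [pvAddP, pvScan]
  · rw [if_neg hcnd, if_neg (by rintro ⟨h1, h2, h3⟩; simp [pvLead] at h3; exact hcnd ⟨by omega, h2⟩)]
    simp [pvAddP, pvScan]

-- mid-run: the credit is unchanged by one col step
lemma credit_step_pos (board : List (List String)) (col : String) (length d_y d_x : Int)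
    (f : Nat) (y x : Int) (b : Option String) (r : Int) (hr : 1 ≤ r)
    (hin : pvInB board y x = true) (hcol : pvCell board y x = col) :
    pvC board col length d_y d_x (f + 1) y x b r =
      pvC board col length d_y d_x f (y + d_y) (x + d_x) b (r + 1) := by
  unfold pvC
  have hm : pvLead col (pvCollect board d_y d_x (f+1) y x)
      = pvLead col (pvCollect board d_y d_x f (y+d_y) (x+d_x)) + 1 := by
    simp [pvCollect, hin, pvLead, hcol]
  rw [hm]
  set m2 := pvLead col (pvCollect board d_y d_x f (y+d_y) (x+d_x)) with hm2def
  have hcondiff : (1 ≤ r ∧ b ≠ some col ∧ r + ((m2 + 1 : Nat) : Int) = length) ↔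
      (1 ≤ r + 1 ∧ b ≠ some col ∧ (r + 1) + (m2 : Int) = length) := by
    constructor <;> rintro ⟨h1, h2, h3⟩ <;> refine ⟨by omega, h2, ?_⟩ <;> push_cast at h3 ⊢ <;> omega
  have hpos1 : y + ((m2 + 1 : Nat) : Int) * d_y = (y + d_y) + (m2 : Int) * d_y := by push_cast; ring
  have hpos2 : x + ((m2 + 1 : Nat) : Int) * d_x = (x + d_x) + (m2 : Int) * d_x := by push_cast; ring
  rw [hpos1, hpos2, if_congr hcondiff rfl rfl]

-- run start: the credit one step in equals A's contribution at this square
lemma credit_step_zero (board : List (List String)) (col : String) (length d_y d_x : Int)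
    (hL : 1 ≤ length) (f : Nat) (y x : Int) (b : Option String)
    (hex : pvExits board d_y d_x (f + 1) y x = true)
    (hin : pvInB board y x = true) (hcol : pvCell board y x = col)
    (hb : b = pvPosOpt board (y - d_y) (x - d_x)) :
    pvC board col length d_y d_x f (y + d_y) (x + d_x) b 1 =
      (if is_sequence_complete board col y x length d_y d_x then
        pvBnd (pvPosOpt board (y - d_y) (x - d_x)) (pvPosOpt board (y + length * d_y) (x + length * d_x))
       else (0, 0)) := by
  have hcomp := complete_char board col d_y d_x length hL (f+1) y x hex
  have hm : pvLead col (pvCollect board d_y d_x (f+1) y x)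
      = pvLead col (pvCollect board d_y d_x f (y+d_y) (x+d_x)) + 1 := by
    simp [pvCollect, hin, pvLead, hcol]
  set m2 := pvLead col (pvCollect board d_y d_x f (y+d_y) (x+d_x)) with hm2def
  unfold pvC
  rw [← hm2def]
  by_cases hbne : b = some col
  · -- run preceded by col: neither side counts
    have hcmp : is_sequence_complete board col y x length d_y d_x = false := by
      rw [hcomp]
      have : (pvPosOpt board (y - d_y) (x - d_x) == some col) = true := by rw [← hb, hbne]; simp
      simp [this]
    rw [hcmp]
    rw [if_neg (by rintro ⟨_, h2, _⟩; exact h2 hbne)]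
    simp
  · by_cases hlen : (1 : Int) + (m2 : Int) = length
    · have hcmp : is_sequence_complete board col y x length d_y d_x = true := by
        rw [hcomp]
        have h1 : ((pvLead col (pvCollect board d_y d_x (f+1) y x) : Nat) : Int) = length := by
          rw [hm]; push_cast; omega
        have h2 : (pvPosOpt board (y - d_y) (x - d_x) == some col) = false := by
          rw [← hb]; simpa using hbne
        simp [h1, h2]
      rw [hcmp, if_pos ⟨le_refl 1, hbne, by omega⟩]
      rw [← hb]
      have hp1 : (y + d_y) + (m2 : Int) * d_y = y + length * d_y := by
        rw [← hlen]; ring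
      have hp2 : (x + d_x) + (m2 : Int) * d_x = x + length * d_x := by
        rw [← hlen]; ring
      rw [hp1, hp2]
      simp
    · have hcmp : is_sequence_complete board col y x length d_y d_x = false := by
        rw [hcomp]
        have h1 : ¬ ((pvLead col (pvCollect board d_y d_x (f+1) y x) : Nat) : Int) = length := by
          rw [hm]; push_cast; omega
        simp [h1]
      rw [hcmp, if_neg (by rintro ⟨_, _, h3⟩; exact hlen (by omega))]
      simp

-- main invariant: B's scan from a mid-run state equals A's remaining loop plus
-- the credit for the run in progress
lemma scan_eq_rowLoop (board : List (List String)) (col : String) (length d_y d_x : Int)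
    (hL : 1 ≤ length) :
    ∀ (f : Nat) (y x : Int) (b : Option String) (r : Int), 0 ≤ r →
      pvExits board d_y d_x f y x = true →
      b = pvPosOpt board (y - (r + 1) * d_y) (x - (r + 1) * d_x) →
      (1 ≤ r → pvInB board (y - d_y) (x - d_x) = true ∧ pvCell board (y - d_y) (x - d_x) = col) →
      pvScan col length ((pvCollect board d_y d_x f y x).map some ++ [none]) b r 0 0 =
        pvAddP (pvRowLoop board col length d_y d_x f y x 0 0)
               (pvC board col length d_y d_x f y x b r) := by
  intro f
  induction f with
  | zero =>
    intro y x b r hr hex hb hprev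
    have hin : pvInB board y x = false := by simpa [pvExits] using hex
    exact scan_eq_edge board col length d_y d_x hL 0 y x b r hin
  | succ f ih =>
    intro y x b r hr hex hb hprev
    by_cases hin : pvInB board y x = true
    · have hex' : pvExits board d_y d_x f (y + d_y) (x + d_x) = true := by
        simpa [pvExits, hin] using hex
      have hsq : is_sq_in_board board y x = true := by rw [inb_eq]; exact hin
      have hcoll : pvCollect board d_y d_x (f+1) y x
          = pvCell board y x :: pvCollect board d_y d_x f (y+d_y) (x+d_x) := by
        simp [pvCollect, hin]
      by_cases hcol : pvCell board y x = col
      · -- a col cell: the run grows by one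
        rw [hcoll]
        simp only [List.map_cons, List.cons_append]
        have hhead : ((some (pvCell board y x) : Option String) == some col) = true := by
          simp [hcol]
        have hstep : pvScan col length
            (some (pvCell board y x) :: ((pvCollect board d_y d_x f (y+d_y) (x+d_x)).map some ++ [none])) b r 0 0
            = pvScan col length ((pvCollect board d_y d_x f (y+d_y) (x+d_x)).map some ++ [none]) b (r+1) 0 0 := by
          simp only [pvScan, hhead, if_true]
        rw [hstep]
        have hb' : b = pvPosOpt board ((y+d_y) - ((r+1)+1)*d_y) ((x+d_x) - ((r+1)+1)*d_x) := by
          rw [hb]; congr 1 <;> ring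
        have hprev' : 1 ≤ r+1 → pvInB board ((y+d_y) - d_y) ((x+d_x) - d_x) = true ∧
            pvCell board ((y+d_y) - d_y) ((x+d_x) - d_x) = col := by
          intro _
          rw [show (y+d_y) - d_y = y from by ring, show (x+d_x) - d_x = x from by ring]
          exact ⟨hin, hcol⟩
        rw [ih (y+d_y) (x+d_x) b (r+1) (by omega) hex' hb' hprev']
        rcases (by omega : r = 0 ∨ 1 ≤ r) with hr0 | hr1
        · subst hr0
          have hbpos : b = pvPosOpt board (y - d_y) (x - d_x) := by
            rw [hb]; congr 1 <;> ring
          rw [rowLoop_step board col length d_y d_x f y x hin]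
          have hC0 : pvC board col length d_y d_x (f+1) y x b 0 = (0, 0) := by
            unfold pvC; rw [if_neg]; rintro ⟨h1, _, _⟩; omega
          rw [hC0]
          rw [show (0:Int) + 1 = 1 from by norm_num]
          rw [credit_step_zero board col length d_y d_x hL f y x b hex hin hcol hbpos]
          by_cases hcmp : is_sequence_complete board col y x length d_y d_x = true <;>
            simp [hcmp, pvAddP] <;> constructor <;> ring
        · obtain ⟨hpin, hpcol⟩ := hprev hr1
          have hcf := complete_false_prev board col d_y d_x length y x hpin hpcol
          have hrl : pvRowLoop board col length d_y d_x (f+1) y x 0 0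
              = pvRowLoop board col length d_y d_x f (y+d_y) (x+d_x) 0 0 := by
            simp [pvRowLoop, hsq, hcf]
          rw [hrl, credit_step_pos board col length d_y d_x f y x b r hr1 hin hcol]
      · -- a non-col cell: the run (if any) is closed here
        rw [hcoll]
        simp only [List.map_cons, List.cons_append]
        have hhead : ((some (pvCell board y x) : Option String) == some col) = false := by
          simp [hcol]
        rw [scan_step_noncol col length _ _ b r hhead]
        have hb' : (some (pvCell board y x) : Option String)
            = pvPosOpt board ((y+d_y) - (0+1)*d_y) ((x+d_x) - (0+1)*d_x) := by
          rw [show (y+d_y) - (0+1)*d_y = y from by ring, show (x+d_x) - (0+1)*d_x = x from by ring]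
          simp [pvPosOpt, hin]
        rw [ih (y+d_y) (x+d_x) (some (pvCell board y x)) 0 le_rfl hex' hb'
            (fun h => absurd h (by norm_num))]
        have hC0 : pvC board col length d_y d_x f (y+d_y) (x+d_x) (some (pvCell board y x)) 0 = (0, 0) := by
          unfold pvC; rw [if_neg]; rintro ⟨h1, _, _⟩; omega
        rw [hC0]
        have hcf := complete_false_head board col d_y d_x length hL y x hcol
        have hrl : pvRowLoop board col length d_y d_x (f+1) y x 0 0
            = pvRowLoop board col length d_y d_x f (y+d_y) (x+d_x) 0 0 := by
          simp [pvRowLoop, hsq, hcf]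
        rw [hrl]
        have hCr : pvC board col length d_y d_x (f+1) y x b r
            = (if r = length ∧ ¬ b = some col then pvBnd b (some (pvCell board y x)) else (0, 0)) := by
          unfold pvC
          have hm : pvLead col (pvCollect board d_y d_x (f+1) y x) = 0 := by
            simp [pvCollect, hin, pvLead, hcol]
          rw [hm]
          have hpos : pvPosOpt board (y + ((0 : Nat) : Int) * d_y) (x + ((0 : Nat) : Int) * d_x)
              = some (pvCell board y x) := by
            simp [pvPosOpt, hin]
          rw [hpos]
          by_cases hcnd : r = length ∧ ¬ b = some col
          · rw [if_pos hcnd, if_pos ⟨by omega, hcnd.2, by push_cast; omega⟩]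
          · rw [if_neg hcnd, if_neg (by rintro ⟨h1, h2, h3⟩; push_cast at h3; exact hcnd ⟨by omega, h2⟩)]
        rw [hCr]
        by_cases hcnd : r = length ∧ ¬ b = some col <;>
          simp [hcnd, pvAddP] <;> constructor <;> ring
    · simp only [Bool.not_eq_true] at hin
      exact scan_eq_edge board col length d_y d_x hL (f+1) y x b r hin

-- ===== VERDICT (by name: the statement is the Claim_ definition above) =====
theorem detect_row_spec : Claim_equal_detect_row := by
  unfold Claim_equal_detect_row Spec_detect_row
  intro board col y_start x_start length d_y d_x _ hpre
  obtain ⟨hrows, hL, hdir⟩ := hpre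
  by_cases hstart : pvInB board y_start x_start = true
  case neg =>
    simp only [Bool.not_eq_true] at hstart
    unfold detect_row detect_row_alt
    rw [rowLoop_out board col length d_y d_x y_start x_start hstart (board.length + 1) 0 0]
    simp [hstart]
  case pos =>
  have hex : pvExits board d_y d_x (board.length + 1) y_start x_start = true := by
    by_cases hin0 : pvInB board y_start x_start = true
    · have hbnd : 0 ≤ y_start ∧ y_start < (board.length : Int) ∧ 0 ≤ x_start ∧ x_start < (board.length : Int) := by
        simpa [pvInB] using hin0
      have hd : ¬(d_y = 0 ∧ d_x = 0) := by
        rcases hdir with h | h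
        · exact h
        · rw [h] at hin0; cases hin0
      rcases (by omega : 1 ≤ d_y ∨ d_y ≤ -1 ∨ 1 ≤ d_x ∨ d_x ≤ -1) with h | h | h | h
      · exact exits_suff board d_y d_x (board.length + 1) y_start x_start
          (Or.inl ⟨h, by push_cast; omega⟩)
      · exact exits_suff board d_y d_x (board.length + 1) y_start x_start
          (Or.inr (Or.inl ⟨h, by push_cast; omega⟩))
      · exact exits_suff board d_y d_x (board.length + 1) y_start x_start
          (Or.inr (Or.inr (Or.inl ⟨h, by push_cast; omega⟩)))
      · exact exits_suff board d_y d_x (board.length + 1) y_start x_start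
          (Or.inr (Or.inr (Or.inr ⟨h, by push_cast; omega⟩)))
    · simp only [Bool.not_eq_true] at hin0
      simp [pvExits, hin0]
  have hb0 : (if pvInB board (y_start - d_y) (x_start - d_x) then
        some (pvCell board (y_start - d_y) (x_start - d_x)) else none)
      = pvPosOpt board (y_start - (0 + 1) * d_y) (x_start - (0 + 1) * d_x) := by
    unfold pvPosOpt
    rw [show y_start - (0 + 1) * d_y = y_start - d_y from by ring,
        show x_start - (0 + 1) * d_x = x_start - d_x from by ring]
  have hmain := scan_eq_rowLoop board col length d_y d_x hL (board.length + 1)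
      y_start x_start (pvPosOpt board (y_start - (0 + 1) * d_y) (x_start - (0 + 1) * d_x)) 0
      le_rfl hex rfl (fun h => absurd h (by norm_num))
  have hC0 : pvC board col length d_y d_x (board.length + 1) y_start x_start
      (pvPosOpt board (y_start - (0 + 1) * d_y) (x_start - (0 + 1) * d_x)) 0 = (0, 0) := by
    unfold pvC; rw [if_neg]; rintro ⟨h1, _, _⟩; omega
  rw [hC0] at hmain
  unfold detect_row detect_row_alt
  rw [hstart]
  simp only [Bool.not_true, Bool.false_eq_true, if_false]
  rw [hb0, hmain]
  simp [pvAddP]
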